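-- pv_equiv track=rewrite | github.com/x0cloud69/david | ky-codyssey-main/Codyseey/PCCP/3_div_2.py | solution
-- ===== SOURCE A (Python) =====
-- def solution(queries):
--     def get_genotype(depth, position):
--         # 첫 번째 세대는 항상 Rr
--         if depth == 1:
--             return "Rr"
--
--         # 부모의 위치 계산
--         parent_position = (position - 1) // 4 + 1
--         parent_genotype = get_genotype(depth - 1, parent_position)
--
--         # 부모가 순종(RR 또는 rr)이면 자식도 같은 유전자형
--         if parent_genotype == "RR":
--             return "RR"
--         if parent_genotype == "rr":
--             return "rr"
--
--         # 부모가 Rr인 경우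
--         child_position = (position - 1) % 4
--         if child_position == 0:
--             return "RR"
--         elif child_position == 1 or child_position == 2:
--             return "Rr"
--         else:  # child_position == 3
--             return "rr"
--
--     return [get_genotype(depth, position) for depth, position in queries]
-- ===== SOURCE B (Python) =====
-- def solution(queries):
--     def genotype(depth, position):
--         # walk from the root downward: the base-4 digit of position-1 at each
--         # generation is the branch taken; the first digit 0 (pure RR) or
--         # 3 (pure rr) is decisive, digits 1/2 keep the hybrid going
--         if depth == 1:
--             return "Rr"
--         digit = ((position - 1) >> (2 * (depth - 2))) % 4
--         if digit == 0:
--             return "RR"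
--         if digit == 3:
--             return "rr"
--         return genotype(depth - 1, position)
--
--     return [genotype(depth, position) for depth, position in queries]
-- ===== Notes on version B (the rewrite author's own statement) =====
-- stated objective: alternative
-- what changed: Replaces the bottom-up recursion (compute the parent's genotype first, then branch on the parent genotype string and the child offset) with a top-down walk that reads the decisive base-4 digit of position-1 directly at each generation (via an arithmetic shift) and short-circuits at the first digit 0 (RR) or 3 (rr), never computing parent positions or comparing genotype strings.
import Mathlib
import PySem

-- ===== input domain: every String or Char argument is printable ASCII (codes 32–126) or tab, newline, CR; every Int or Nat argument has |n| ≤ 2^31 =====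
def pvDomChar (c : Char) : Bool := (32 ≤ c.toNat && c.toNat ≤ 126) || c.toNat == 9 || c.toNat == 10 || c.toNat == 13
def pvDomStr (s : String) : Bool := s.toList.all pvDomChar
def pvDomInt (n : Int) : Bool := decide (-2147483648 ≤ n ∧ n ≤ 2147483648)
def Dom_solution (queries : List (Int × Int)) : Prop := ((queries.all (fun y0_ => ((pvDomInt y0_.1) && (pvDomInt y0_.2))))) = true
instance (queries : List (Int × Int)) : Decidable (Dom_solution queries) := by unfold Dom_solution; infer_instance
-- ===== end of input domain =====

-- B replaces A's bottom-up recursion (parent genotype first, then branch on the parent's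
-- genotype string and the child offset) by a top-down walk that reads the decisive base-4
-- digit of position-1 directly at each generation and stops at the first digit 0 or 3
-- (alternative decomposition, same asymptotic cost); both raise on queries with depth ≤ 0.

-- ===== PORT A =====
-- literal port of A's inner recursive get_genotype; the 'depth ≤ 1' guard only makes the
-- recursion total in Lean (Python diverges for depth < 1, excluded by Pre_)
def getGenotypeA (depth position : Int) : String :=
  if _h : depth ≤ 1 then "Rr"
  else
    let parent_position := PySem.Int.floordiv (position - 1) 4 + 1
    let parent_genotype := getGenotypeA (depth - 1) parent_position
    if parent_genotype = "RR" then "RR"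
    else if parent_genotype = "rr" then "rr"
    else
      let child_position := PySem.Int.mod (position - 1) 4
      if child_position = 0 then "RR"
      else if child_position = 1 ∨ child_position = 2 then "Rr"
      else "rr"
termination_by depth.toNat
decreasing_by omega

def solution (queries : List (Int × Int)) : List String :=
  queries.map (fun dp => getGenotypeA dp.1 dp.2)

-- ===== PORT B =====
-- port of B's inner recursive genotype; Python's '(position-1) >> (2*(depth-2))' is
-- Lean's '>>>' with a Nat shift count — exact here, since depth ≥ 2 past the guard
-- (for depth < 1 Python raises ValueError on the negative shift, excluded by Pre_)
def genotypeB (depth position : Int) : String :=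
  if _h : depth ≤ 1 then "Rr"
  else
    let digit := PySem.Int.mod ((position - 1) >>> (2 * (depth - 2)).toNat) 4
    if digit = 0 then "RR"
    else if digit = 3 then "rr"
    else genotypeB (depth - 1) position
termination_by depth.toNat
decreasing_by omega

def solution_alt (queries : List (Int × Int)) : List String :=
  queries.map (fun dp => genotypeB dp.1 dp.2)

-- ===== PRECONDITION & SPEC =====
-- Pre_ excludes queries containing a depth ≤ 0: there A recurses with no base case and
-- raises RecursionError (B raises ValueError on the negative shift); neither returns.
def Pre_solution (queries : List (Int × Int)) : Prop :=
  ∀ q ∈ queries, 1 ≤ q.1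
instance (queries : List (Int × Int)) : Decidable (Pre_solution queries) := by
  unfold Pre_solution; infer_instance

def pvWitness_solution : (List (Int × Int)) := [(1, 1), (3, 7), (4, 100)]

def Spec_solution (queries : List (Int × Int)) (out : List String) : Prop :=
  out = solution_alt queries
instance (queries : List (Int × Int)) (out : List String) : Decidable (Spec_solution queries out) := by
  unfold Spec_solution; infer_instance

-- ===== CLAIM (what is proved, stated in full; the proofs are below) =====
def Claim_equal_solution : Prop :=
  ∀ (queries : List (Int × Int)), Dom_solution queries → Pre_solution queries →
    Spec_solution queries (solution queries)

-- ===== LEMMAS AND PROOFS =====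

-- proof-side abstraction of the digit walk: scanDigits p n inspects the n base-4 digits
-- of p-1, most significant (index n-1) first
def scanDigits (position : Int) : Nat → String
  | 0 => "Rr"
  | k + 1 =>
    let digit := PySem.Int.mod (PySem.Int.floordiv (position - 1) (4 ^ k)) 4
    if digit = 0 then "RR"
    else if digit = 3 then "rr"
    else scanDigits position k

-- B's shifted digit is the base-4 digit that scanDigits reads
theorem digit_shift_eq (x : Int) (k : Nat) :
    PySem.Int.mod (x >>> (2 * k)) 4 = PySem.Int.mod (PySem.Int.floordiv x (4 ^ k)) 4 := by
  have h4k : (0:Int) < 4 ^ k := by positivity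
  rw [PySem.Int.floordiv_eq_ediv_of_pos h4k, Int.shiftRight_eq_div_pow]
  congr 2
  push_cast
  rw [pow_mul]
  norm_num

-- the decisive digit that A reads at depth n+2 as the child_position of the recursion at
-- level k is the digit that the scan reads up front: peel one generation off the scan
theorem scanDigits_succ (p : Int) (n : Nat) :
    scanDigits p (n + 1) =
      (let pg := scanDigits (PySem.Int.floordiv (p - 1) 4 + 1) n
       if pg = "RR" then "RR"
       else if pg = "rr" then "rr"
       else
         let cp := PySem.Int.mod (p - 1) 4
         if cp = 0 then "RR"
         else if cp = 1 ∨ cp = 2 then "Rr"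
         else "rr") := by
  induction n with
  | zero =>
    simp only [scanDigits, pow_zero]
    have h4 : (0:Int) < 4 := by norm_num
    rw [PySem.Int.floordiv_eq_ediv_of_pos (by norm_num : (0:Int) < 1), Int.ediv_one]
    have hm := PySem.Int.mod_eq_emod_of_pos (a := p - 1) h4
    have hlo := Int.emod_nonneg (p - 1) (by norm_num : (4:Int) ≠ 0)
    have hhi := Int.emod_lt_of_pos (p - 1) h4
    rw [hm]
    interval_cases h : (p - 1) % 4 <;> simp
  | succ k ih =>
    have h4 : (0:Int) < 4 := by norm_num
    have h4k : (0:Int) < 4 ^ k := by positivity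
    have hdig :
        PySem.Int.floordiv (PySem.Int.floordiv (p - 1) 4 + 1 - 1) (4 ^ k) =
        PySem.Int.floordiv (p - 1) (4 ^ (k + 1)) := by
      rw [PySem.Int.floordiv_eq_ediv_of_pos h4,
          PySem.Int.floordiv_eq_ediv_of_pos h4k,
          PySem.Int.floordiv_eq_ediv_of_pos (by positivity : (0:Int) < 4 ^ (k+1))]
      have h1 : (p - 1) / 4 + 1 - 1 = (p - 1) / 4 := by ring
      rw [h1, Int.ediv_ediv_of_nonneg (by norm_num : (0:Int) ≤ 4)]
      ring_nf
    conv_lhs => rw [scanDigits]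
    conv_rhs => rw [scanDigits]
    rw [hdig, ih]
    generalize PySem.Int.mod (PySem.Int.floordiv (p - 1) (4 ^ (k + 1))) 4 = x
    generalize scanDigits (PySem.Int.floordiv (p - 1) 4 + 1) k = s
    generalize PySem.Int.mod (p - 1) 4 = c
    by_cases h0 : x = 0
    · simp [h0]
    · by_cases h3 : x = 3
      · simp [h3]
      · simp [h0, h3]

theorem genotypeB_eq_scan (n : Nat) :
    ∀ (d p : Int), d = (n : Int) + 1 → genotypeB d p = scanDigits p n := by
  induction n with
  | zero =>
    intro d p hd
    rw [genotypeB]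
    simp [hd, scanDigits]
  | succ k ih =>
    intro d p hd
    rw [genotypeB]
    have hgt : ¬ d ≤ 1 := by omega
    simp only [hgt, dif_neg, not_false_iff]
    have hk : (2 * (d - 2)).toNat = 2 * k := by omega
    rw [hk, digit_shift_eq]
    conv_rhs => rw [scanDigits]
    rw [ih (d - 1) p (by omega)]

theorem getGenotypeA_eq_scan (n : Nat) :
    ∀ (d p : Int), d = (n : Int) + 1 → getGenotypeA d p = scanDigits p n := by
  induction n with
  | zero =>
    intro d p hd
    rw [getGenotypeA]
    simp [hd, scanDigits]
  | succ k ih =>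
    intro d p hd
    rw [getGenotypeA]
    have hgt : ¬ d ≤ 1 := by omega
    simp only [hgt, dif_neg, not_false_iff]
    rw [ih (d - 1) (PySem.Int.floordiv (p - 1) 4 + 1) (by omega)]
    rw [scanDigits_succ]

-- ===== VERDICT (by name: the statement is the Claim_ definition above) =====
theorem solution_spec : Claim_equal_solution := by
  intro queries _hdom hpre
  unfold Spec_solution solution solution_alt
  apply List.map_congr_left
  intro dp hmem
  have h1 : 1 ≤ dp.1 := hpre dp hmem
  rw [getGenotypeA_eq_scan (dp.1 - 1).toNat dp.1 dp.2 (by omega),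
      genotypeB_eq_scan (dp.1 - 1).toNat dp.1 dp.2 (by omega)]
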